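-- pv_equiv track=rewrite | github.com/Kanefav/CodeWars | Challenge34.py | solve
-- ===== SOURCE A (Python) =====
-- from math import sqrt
--
-- def solve(a,b):
--     FactorList = []
--     PrimesList = []
--     for num in range(1, b+1):
--         if b % num == 0:
--             FactorList.append(num)
--
--     for num in FactorList:
--         if prime(num) == True:
--             PrimesList.append(num)
--
--     for div in PrimesList:
--         if a % div == 0:
--             continue
--         else:
--             return False
--     return True
--
-- def prime(num):
--     if num == 2: return True
--     if num % 2 == 0: return False
--     for div in range(2, int(sqrt(num)+1)):
--         if num % div == 0: return False
--     return True
-- ===== SOURCE B (Python) =====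
-- from math import gcd
--
-- def solve(a, b):
--     # All prime factors of b divide a  <=>  repeatedly stripping gcd(n, a)
--     # from n = b reduces n to 1.  For b <= 0 there are no factors to check.
--     if b <= 0:
--         return True
--     n = b
--     g = gcd(n, a)
--     while g > 1:
--         n //= g
--         g = gcd(n, a)
--     return n == 1
-- ===== Notes on version B (the rewrite author's own statement) =====
-- stated objective: faster
-- what changed: A enumerates every factor of b (O(b) scan), primality-tests each one, then checks divisibility; B never factorizes: it repeatedly divides b by gcd(b, a) until the two are coprime and checks whether b shrank to 1.
import Mathlib
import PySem

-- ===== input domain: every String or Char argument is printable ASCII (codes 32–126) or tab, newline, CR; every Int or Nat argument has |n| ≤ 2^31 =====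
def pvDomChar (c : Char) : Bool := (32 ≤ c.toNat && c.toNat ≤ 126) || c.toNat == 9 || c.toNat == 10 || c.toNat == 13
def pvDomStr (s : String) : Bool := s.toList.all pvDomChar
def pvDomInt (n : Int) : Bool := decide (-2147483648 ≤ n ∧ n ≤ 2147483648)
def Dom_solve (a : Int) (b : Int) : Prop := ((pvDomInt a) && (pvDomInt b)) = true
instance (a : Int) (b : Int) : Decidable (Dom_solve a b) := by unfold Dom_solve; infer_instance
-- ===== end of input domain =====

-- B replaces A's enumerate-all-factors-then-primality-test scan by a gcd-stripping loop
-- (divide b by gcd(b, a) until coprime); objective: faster.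


-- ===== PORT A =====
-- prime(num): Python's int(sqrt(num)+1) equals Nat.sqrt num.toNat + 1 for the positive
-- arguments this program reaches under Dom (|num| ≤ 2^31, where the float sqrt is exact).
def primePy (num : Int) : Bool :=
  if num == 2 then true
  else if PySem.Int.mod num 2 == 0 then false
  else if (PySem.List.pyRange 2 ((Nat.sqrt num.toNat : Int) + 1) 1).any
            (fun div => PySem.Int.mod num div == 0) then false
  else true

def solve (a : Int) (b : Int) : Bool :=
  -- first loop: collect the factors of b
  let FactorList := (PySem.List.pyRange 1 (b + 1) 1).foldl
    (fun acc num => if PySem.Int.mod b num == 0 then acc ++ [num] else acc) []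
  -- second loop: keep the primes
  let PrimesList := FactorList.foldl
    (fun acc num => if primePy num == true then acc ++ [num] else acc) []
  -- third loop: return False on the first prime factor not dividing a
  PrimesList.all (fun div => PySem.Int.mod a div == 0)

-- ===== PORT B =====
-- while g > 1: n //= g; g = gcd(n, a).  The '1 ≤ n' conjunct only makes the recursion
-- well-founded; it never fails when called from solve_alt, where n starts positive.
def gcdLoop (n : Int) (a : Int) : Int :=
  if _h : 1 < (Int.gcd n a : Int) ∧ 1 ≤ n then
    gcdLoop (PySem.Int.floordiv n (Int.gcd n a : Int)) a
  else n
termination_by n.toNat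
decreasing_by
  obtain ⟨hg, hn⟩ := _h
  rw [PySem.Int.floordiv_eq_ediv_of_pos (by omega)]
  have hlt : n / (Int.gcd n a : Int) < n := by
    rw [Int.ediv_lt_iff_lt_mul (by omega)]
    nlinarith
  omega

def solve_alt (a : Int) (b : Int) : Bool :=
  if b ≤ 0 then true
  else gcdLoop b a == 1

-- ===== PRECONDITION & SPEC =====
def Spec_solve (a : Int) (b : Int) (out : Bool) : Prop := out = solve_alt a b
instance (a : Int) (b : Int) (out : Bool) : Decidable (Spec_solve a b out) := by unfold Spec_solve; infer_instance

-- ===== CLAIM (what is proved, stated in full; the proofs are below) =====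
def Claim_equal_solve : Prop := ∀ (a : Int) (b : Int), Dom_solve a b → Spec_solve a b (solve a b)

-- ===== LEMMAS AND PROOFS =====

-- the common specification: every prime factor of n divides a
def AllPrimeDvd (a n : Int) : Prop := ∀ p : Nat, p.Prime → (p : Int) ∣ n → (p : Int) ∣ a

-- A's prime() accepts exactly 1 and the primes among the positive inputs it is fed
theorem primePy_iff (num : Int) (h1 : 1 ≤ num) :
    primePy num = true ↔ (num = 1 ∨ Nat.Prime num.toNat) := by
  unfold primePy
  by_cases h2 : num = 2
  · subst h2; norm_num; decide
  rw [if_neg (by simpa using h2)]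
  by_cases heven : PySem.Int.mod num 2 = 0
  · rw [if_pos (by simpa using heven)]
    have hdvd : (2:Int) ∣ num := (PySem.Int.mod_eq_zero_iff_dvd num 2).mp heven
    have h2m : 2 ∣ num.toNat := by
      obtain ⟨c, hc⟩ := hdvd
      exact ⟨c.toNat, by omega⟩
    simp only [Bool.false_eq_true, false_iff]
    rintro (rfl | hp)
    · omega
    · rcases Nat.Prime.eq_one_or_self_of_dvd hp 2 h2m with h | h
      · omega
      · omega
  · rw [if_neg (by simpa using heven)]
    have hodd : ¬ (2:Int) ∣ num := fun hd => heven ((PySem.Int.mod_eq_zero_iff_dvd num 2).mpr hd)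
    by_cases hn1 : num = 1
    · subst hn1
      norm_num
    · have h3 : 3 ≤ num := by
        rcases Int.even_or_odd num with ⟨c, hc⟩ | ⟨c, hc⟩
        · exact absurd ⟨c, by omega⟩ hodd
        · omega
      have hnum : (num.toNat : Int) = num := Int.toNat_of_nonneg (by omega)
      by_cases hany : ((PySem.List.pyRange 2 ((Nat.sqrt num.toNat : Int) + 1) 1).any
            (fun div => PySem.Int.mod num div == 0)) = true
      · rw [if_pos hany]
        simp only [Bool.false_eq_true, false_iff]
        intro hRHS
        rcases hRHS with h | hp
        · omega
        rw [List.any_eq_true] at hany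
        obtain ⟨div, hmem, hdv⟩ := hany
        rw [PySem.List.mem_pyRange_one] at hmem
        have hdvd2 : div ∣ num := (PySem.Int.mod_eq_zero_iff_dvd num div).mp (by simpa using hdv)
        have hd2 : 2 ≤ div := hmem.1
        have hdle : div.toNat ≤ Nat.sqrt num.toNat := by
          have := hmem.2
          omega
        have hdd : div.toNat ∣ num.toNat := by
          have h' : ((div.toNat : Int)) ∣ ((num.toNat : Int)) := by
            rw [hnum, Int.toNat_of_nonneg (by omega)]; exact hdvd2
          exact_mod_cast h'
        exact (Nat.prime_def_le_sqrt.mp hp).2 div.toNat (by omega) hdle hdd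
      · rw [if_neg hany]
        simp only [true_iff]
        right
        rw [Nat.prime_def_le_sqrt]
        refine ⟨by omega, fun d hd2 hdsqrt hddvd => ?_⟩
        apply hany
        rw [List.any_eq_true]
        refine ⟨(d : Int), ?_, ?_⟩
        · rw [PySem.List.mem_pyRange_one]
          constructor
          · exact_mod_cast hd2
          · have : (d:Int) ≤ (Nat.sqrt num.toNat : Int) := by exact_mod_cast hdsqrt
            omega
        · have hdn : (d:Int) ∣ num := by
            rw [← hnum]; exact_mod_cast hddvd
          simpa using (PySem.Int.mod_eq_zero_iff_dvd num d).mpr hdn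

-- B's loop reaches 1 exactly when every prime factor of its argument divides a
theorem gcdLoop_aux (a : Int) : ∀ k : Nat, ∀ n : Int, n.toNat = k → 1 ≤ n →
    (gcdLoop n a = 1 ↔ AllPrimeDvd a n) := by
  intro k
  induction k using Nat.strong_induction_on with
  | _ k ih =>
    intro n hk hn
    rw [gcdLoop]
    by_cases hg : 1 < (Int.gcd n a : Int) ∧ 1 ≤ n
    · rw [dif_pos hg]
      set g : Int := (Int.gcd n a : Int) with hgdef
      have hdvd : g ∣ n := Int.gcd_dvd_left n a
      have hga : g ∣ a := Int.gcd_dvd_right n a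
      have hgpos : (0:Int) < g := by omega
      obtain ⟨c, hc⟩ := hdvd
      have hc1 : n / g = c := by
        rw [hc]; exact Int.mul_ediv_cancel_left c (by omega)
      have hcpos : 1 ≤ c := by
        by_contra hle
        have hnp : g * c ≤ 0 :=
          mul_nonpos_iff.mpr (Or.inl ⟨le_of_lt hgpos, by omega⟩)
        omega
      rw [PySem.Int.floordiv_eq_ediv_of_pos hgpos, hc1]
      have hklt : c.toNat < k := by
        have hmul : c * 1 < c * g :=
          mul_lt_mul_of_pos_left hg.1 (by omega)
        rw [mul_one, mul_comm] at hmul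
        omega
      rw [ih c.toNat hklt c rfl hcpos]
      constructor
      · intro hspec p hp hpn
        rw [hc] at hpn
        rcases Int.Prime.dvd_mul hp hpn with hL | hR
        · have hpg : (p:Int) ∣ g := by
            rw [hgdef] at hL ⊢
            have h' := Int.natCast_dvd_natCast.mpr hL
            simpa using h'
          exact hpg.trans hga
        · have hpc : (p:Int) ∣ c := by
            have h' := Int.natCast_dvd_natCast.mpr hR
            have habs : (c.natAbs : Int) = c := by omega
            rwa [habs] at h'
          exact hspec p hp hpc
      · intro hspec p hp hpc
        exact hspec p hp (hpc.trans ⟨g, by rw [mul_comm c g]; exact hc⟩)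
    · rw [dif_neg hg]
      have hg1 : Int.gcd n a = 1 := by
        have hpos : 0 < Int.gcd n a := Int.gcd_pos_of_ne_zero_left a (by omega)
        omega
      constructor
      · intro h1 p hp hpn
        exfalso
        have := Int.le_of_dvd (by omega) hpn
        rw [h1] at this
        have := hp.two_le
        omega
      · intro hspec
        by_contra hne
        have hn2 : 2 ≤ n.toNat := by omega
        have hq := Nat.minFac_prime (n := n.toNat) (by omega)
        have hqn : (n.toNat.minFac : Int) ∣ n := by
          have := Int.natCast_dvd_natCast.mpr (Nat.minFac_dvd n.toNat)
          rwa [Int.toNat_of_nonneg (by omega)] at this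
        have hqa : (n.toNat.minFac : Int) ∣ a := hspec _ hq hqn
        have hdg : n.toNat.minFac ∣ Int.gcd n a := by
          apply Nat.dvd_gcd
          · have : ((n.toNat.minFac : Int)).natAbs ∣ n.natAbs := Int.natAbs_dvd_natAbs.mpr hqn
            simpa using this
          · have : ((n.toNat.minFac : Int)).natAbs ∣ a.natAbs := Int.natAbs_dvd_natAbs.mpr hqa
            simpa using this
        rw [hg1] at hdg
        exact hq.one_lt.ne' (Nat.dvd_one.mp hdg)

theorem gcdLoop_eq_one_iff (a n : Int) (hn : 1 ≤ n) :
    gcdLoop n a = 1 ↔ AllPrimeDvd a n :=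
  gcdLoop_aux a n.toNat n rfl hn

-- A's three loops, characterised
theorem solve_true_iff (a b : Int) (hb : 1 ≤ b) :
    solve a b = true ↔ AllPrimeDvd a b := by
  unfold solve
  simp only [PySem.List.foldl_append_if, List.nil_append, List.map_id']
  rw [List.all_eq_true]
  constructor
  · intro h p hp hpb
    have hple : (p:Int) ≤ b := Int.le_of_dvd (by omega) hpb
    have h2 : (2:Int) ≤ (p:Int) := by exact_mod_cast hp.two_le
    have hmem : ((p:Int)) ∈ (((PySem.List.pyRange 1 (b + 1) 1).filter
        (fun num => PySem.Int.mod b num == 0)).filter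
        (fun num => primePy num == true)) := by
      rw [List.mem_filter, List.mem_filter, PySem.List.mem_pyRange_one]
      refine ⟨⟨⟨by omega, by omega⟩, ?_⟩, ?_⟩
      · simpa using (PySem.Int.mod_eq_zero_iff_dvd b p).mpr hpb
      · simp [(primePy_iff (p:Int) (by omega)).mpr (Or.inr (by simpa using hp))]
    have := h _ hmem
    exact (PySem.Int.mod_eq_zero_iff_dvd a p).mp (by simpa using this)
  · intro h x hx
    rw [List.mem_filter, List.mem_filter, PySem.List.mem_pyRange_one] at hx
    obtain ⟨⟨⟨hx1, hxb⟩, hmod⟩, hprime⟩ := hx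
    have hxdvd : x ∣ b := (PySem.Int.mod_eq_zero_iff_dvd b x).mp (by simpa using hmod)
    rcases (primePy_iff x hx1).mp (by simpa using hprime) with rfl | hp
    · simp
    · have hxcast : ((x.toNat : Int)) = x := Int.toNat_of_nonneg (by omega)
      have hda := h x.toNat hp (by rwa [hxcast])
      rw [hxcast] at hda
      simpa using (PySem.Int.mod_eq_zero_iff_dvd a x).mpr hda

-- for b ≤ 0 the range is empty and A returns True over empty lists
theorem solve_nonpos (a b : Int) (hb : b ≤ 0) : solve a b = true := by
  unfold solve
  rw [PySem.List.pyRange_one]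
  have h0 : b.toNat = 0 := by omega
  simp [h0]

-- ===== VERDICT (by name: the statement is the Claim_ definition above) =====
theorem solve_spec : Claim_equal_solve := by
  intro a b _
  unfold Spec_solve solve_alt
  by_cases hb : b ≤ 0
  · rw [if_pos hb, solve_nonpos a b hb]
  · rw [if_neg hb]
    have h1 : (1:Int) ≤ b := by omega
    have hA := solve_true_iff a b h1
    have hB := gcdLoop_eq_one_iff a b h1
    cases hs : solve a b <;> cases hg : (gcdLoop b a == 1) <;> simp_all
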